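-- pv_equiv track=rewrite | github.com/zhimanai/ai-search | setup.py | remove_debug
-- ===== SOURCE A (Python) =====
-- def remove_debug(x):
--     if type(x) is str:
--         # x.replace(" -g ") would be probably enough...
--         # but we want to make sure we make it right for every input
--         if x == "-g":
--             return ""
--         if x.startswith("-g "):
--             return remove_debug(x[len("-g ") :])
--         if x.endswith(" -g"):
--             return remove_debug(x[: -len(" -g")])
--         return x.replace(" -g ", " ")
--     return x
-- ===== SOURCE B (Python) =====
-- def remove_debug(x):
--     if type(x) is not str:
--         return x
--     # stage 1: strip every "-g " token from the front
--     while x.startswith("-g "):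
--         x = x[3:]
--     # stage 2: strip every " -g" token from the back
--     while x.endswith(" -g"):
--         x = x[:-3]
--     # a lone "-g" (untouched by the loops) disappears entirely
--     if x == "-g":
--         return ""
--     # stage 3: collapse interior " -g " separators
--     return x.replace(" -g ", " ")
-- ===== Notes on version B (the rewrite author's own statement) =====
-- stated objective: simpler
-- what changed: Replaced A's interleaved four-branch recursion by three flat stages: one loop stripping all leading '-g ' tokens, one loop stripping all trailing ' -g' tokens, a single final bare '-g' check, then the replace; correct because trailing strips can never create a new leading '-g ' or a bare '-g' once leading stripping has finished.
import Mathlib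
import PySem

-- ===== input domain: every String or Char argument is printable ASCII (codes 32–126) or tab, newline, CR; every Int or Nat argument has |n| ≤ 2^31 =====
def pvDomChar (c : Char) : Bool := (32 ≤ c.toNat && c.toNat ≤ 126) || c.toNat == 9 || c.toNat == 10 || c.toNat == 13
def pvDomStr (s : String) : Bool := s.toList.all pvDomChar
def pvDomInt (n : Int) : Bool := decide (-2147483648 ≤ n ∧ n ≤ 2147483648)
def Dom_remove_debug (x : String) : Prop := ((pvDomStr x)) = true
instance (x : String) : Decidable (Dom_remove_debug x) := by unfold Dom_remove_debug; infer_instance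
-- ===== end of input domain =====

-- B replaces A's interleaved recursion by three flat stages: strip leading "-g " tokens,
-- strip trailing " -g" tokens, final bare "-g" check, then one replace (objective: simpler).


-- ===== PORT A =====
-- A's recursion, on the character list (x[3:] = slice 3:, x[:-3] = slice :-3)
def removeDebugA (s : List Char) : List Char :=
  if s = ['-','g'] then []
  else if PySem.Chars.startswith s ['-','g',' '] then
    removeDebugA (PySem.List.slice s (some 3) none)
  else if PySem.Chars.endswith s [' ','-','g'] then
    removeDebugA (PySem.List.slice s none (some (-3)))
  else PySem.Chars.replace s [' ','-','g',' '] [' ']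
termination_by s.length
decreasing_by
  · have h : ['-','g',' '] <+: s := (PySem.Chars.startswith_iff s _).mp (by assumption)
    have h3 : 3 ≤ s.length := h.length_le
    rw [PySem.List.slice_from s (show (0:Int) ≤ 3 by omega)]
    simp; omega
  · have h : [' ','-','g'] <:+ s := (PySem.Chars.endswith_iff s _).mp (by assumption)
    have h3 : 3 ≤ s.length := h.length_le
    rw [PySem.List.slice_to_neg_ofNat s 3 (by omega)]
    simp; omega

def remove_debug (x : String) : String := String.ofList (removeDebugA x.toList)

-- ===== PORT B =====
-- stage 1 of Source B: `while x.startswith("-g "): x = x[3:]`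
def stripLeadB (s : List Char) : List Char :=
  if PySem.Chars.startswith s ['-','g',' '] then
    stripLeadB (PySem.List.slice s (some 3) none)
  else s
termination_by s.length
decreasing_by
  have h : ['-','g',' '] <+: s := (PySem.Chars.startswith_iff s _).mp (by assumption)
  have h3 : 3 ≤ s.length := h.length_le
  rw [PySem.List.slice_from s (show (0:Int) ≤ 3 by omega)]
  simp; omega

-- stage 2 of Source B: `while x.endswith(" -g"): x = x[:-3]`
def stripTrailB (s : List Char) : List Char :=
  if PySem.Chars.endswith s [' ','-','g'] then
    stripTrailB (PySem.List.slice s none (some (-3)))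
  else s
termination_by s.length
decreasing_by
  have h : [' ','-','g'] <:+ s := (PySem.Chars.endswith_iff s _).mp (by assumption)
  have h3 : 3 ≤ s.length := h.length_le
  rw [PySem.List.slice_to_neg_ofNat s 3 (by omega)]
  simp; omega

-- bare "-g" check, then the replace, on the doubly stripped string
def remove_debug_alt (x : String) : String :=
  let y := stripTrailB (stripLeadB x.toList)
  String.ofList (if y = ['-','g'] then [] else PySem.Chars.replace y [' ','-','g',' '] [' '])

-- ===== PRECONDITION & SPEC =====
def Spec_remove_debug (x : String) (out : String) : Prop := out = remove_debug_alt x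
instance (x : String) (out : String) : Decidable (Spec_remove_debug x out) := by unfold Spec_remove_debug; infer_instance

-- ===== CLAIM (what is proved, stated in full; the proofs are below) =====
def Claim_equal_remove_debug : Prop := ∀ (x : String), Dom_remove_debug x → Spec_remove_debug x (remove_debug x)

-- ===== LEMMAS AND PROOFS =====

-- B's three stages on the character list, as one expression
def altCore (s : List Char) : List Char :=
  if stripTrailB (stripLeadB s) = ['-','g'] then []
  else PySem.Chars.replace (stripTrailB (stripLeadB s)) [' ','-','g',' '] [' ']

theorem stripLeadB_of_not (s : List Char)
    (h : ¬ PySem.Chars.startswith s ['-','g',' '] = true) : stripLeadB s = s := by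
  rw [stripLeadB, if_neg h]

theorem stripLeadB_step (s : List Char)
    (h : PySem.Chars.startswith s ['-','g',' '] = true) :
    stripLeadB s = stripLeadB (PySem.List.slice s (some 3) none) := by
  conv_lhs => rw [stripLeadB]
  rw [if_pos h]

theorem stripTrailB_step (s : List Char)
    (h : PySem.Chars.endswith s [' ','-','g'] = true) :
    stripTrailB s = stripTrailB (PySem.List.slice s none (some (-3))) := by
  conv_lhs => rw [stripTrailB]
  rw [if_pos h]

theorem stripTrailB_of_not (s : List Char)
    (h : ¬ PySem.Chars.endswith s [' ','-','g'] = true) : stripTrailB s = s := by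
  rw [stripTrailB, if_neg h]

-- removing the trailing " -g" cannot create a leading "-g " prefix
theorem no_new_prefix (s : List Char)
    (h : ¬ PySem.Chars.startswith s ['-','g',' '] = true) :
    ¬ PySem.Chars.startswith (PySem.List.slice s none (some (-3))) ['-','g',' '] = true := by
  intro hc
  apply h
  rw [PySem.Chars.startswith_iff] at hc ⊢
  rw [PySem.List.slice_to_neg_ofNat s 3 (by omega)] at hc
  exact hc.trans (List.take_prefix _ s)

theorem removeDebugA_eq_altCore (s : List Char) : removeDebugA s = altCore s := by
  induction s using removeDebugA.induct with
  | case1 =>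
    rw [removeDebugA]
    rw [altCore, stripLeadB_of_not _ (by decide),
        stripTrailB_of_not _ (by decide)]
    simp
  | case2 s h1 h2 ih =>
    rw [removeDebugA, if_neg h1, if_pos h2, ih, altCore, altCore, stripLeadB_step s h2]
  | case3 s h1 h2 h3 ih =>
    rw [removeDebugA, if_neg h1, if_neg (by simp [h2]), if_pos h3, ih, altCore, altCore,
        stripLeadB_of_not s (by simp [h2]),
        stripLeadB_of_not _ (no_new_prefix s (by simp [h2])),
        ← stripTrailB_step s h3]
  | case4 s h1 h2 h3 =>
    rw [removeDebugA, if_neg h1, if_neg (by simp [h2]), if_neg (by simp [h3]), altCore,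
        stripLeadB_of_not s (by simp [h2]), stripTrailB_of_not s (by simp [h3]), if_neg h1]

-- ===== VERDICT (by name: the statement is the Claim_ definition above) =====
theorem remove_debug_spec : Claim_equal_remove_debug := by
  intro x _
  unfold Spec_remove_debug remove_debug remove_debug_alt
  rw [removeDebugA_eq_altCore, altCore]
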